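-- pv_equiv track=rewrite | github.com/bitsofbits/advent_of_code | 2021/day_22/pythonimp/implementation.py | reboot
-- ===== SOURCE A (Python) =====
-- def clip(x, a, b):
--     if x < a:
--         return a
--     if x > b:
--         return b
--     return x
--
-- def clip_rng(rng, a, b):
--     x, y = rng
--     return (clip(x, a, b), clip(y, a, b))
--
-- def is_empty(rng):
--     x, y = rng
--     return x >= y
--
-- def lin_intersection(rng_a, rng_b):
--     """
--     ---- ----  -> None
--
--     -----
--        -----   ->  (b1, a2)
--
--     -----
--      ---       ->  (b1, b2)
--
--      ---
--     -----      ->  (a1, a2)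
--     """
--     a1, a2 = rng_a
--     b1, b2 = rng_b
--     x1 = max(a1, b1)
--     x2 = min(a2, b2)
--     if x1 > x2:
--         return None
--     return x1, x2
--
-- def intersection(rgn_a, rgn_b):
--     (ax, ay, az) = rgn_a
--     (bx, by, bz) = rgn_b
--     if (ix := lin_intersection(ax, bx)) is None:
--         return None
--     if (iy := lin_intersection(ay, by)) is None:
--         return None
--     if (iz := lin_intersection(az, bz)) is None:
--         return None
--     return (ix, iy, iz)
--
-- def compute_interation(step_a, step_b):
--     """Affect of step_b coming after step_a"""
--     sa, region_a = step_a
--     sb, region_b = step_b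
--     assert sa in (-1, 1)
--     assert sb in (0, 1)
--     region_c = intersection(region_a, region_b)
--     if region_c is None:
--         return [step_a]
--     return [step_a, (-sa, region_c)]
--
-- def volume(ranges):
--     (x0, x1), (y0, y1), (z0, z1) = ranges
--     return (x1 - x0 + 1) * (y1 - y0 + 1) * (z1 - z0 + 1)
--
-- def reboot(steps, clip=True):
--     interactions = []
--     for i, step_b in enumerate(steps):
--         if clip:
--             s, (x_rng, y_rng, z_rng) = step_b
--             if is_empty(x_rng := clip_rng(x_rng, -50, 50)):
--                 continue
--             if is_empty(y_rng := clip_rng(y_rng, -50, 50)):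
--                 continue
--             if is_empty(z_rng := clip_rng(z_rng, -50, 50)):
--                 continue
--             step_b = (s, (x_rng, y_rng, z_rng))
--         new_interactions = []
--         for x in interactions:
--             new_interactions.extend(compute_interation(x, step_b))
--         if step_b[0]:
--             new_interactions.append(step_b)
--         interactions = new_interactions
--     for x in interactions:
--         assert x[0] in (1, -1)
--     return sum(s * volume(r) for (s, r) in interactions)
-- ===== SOURCE B (Python) =====
-- def reboot(steps, clip=True):
--     kept = []
--     for s, box in steps:
--         if clip:
--             box = tuple((min(max(lo, -50), 50), min(max(hi, -50), 50)) for lo, hi in box)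
--             if any(lo >= hi for lo, hi in box):
--                 continue
--         kept.append((s, box))
--     total = 0
--     for i, (s, box) in enumerate(kept):
--         if s:
--             total += chain_sum(s, box, kept[i + 1:])
--     return total
--
-- def box_intersection(box_a, box_b):
--     inter = tuple((max(a0, b0), min(a1, b1)) for (a0, a1), (b0, b1) in zip(box_a, box_b))
--     if any(lo > hi for lo, hi in inter):
--         return None
--     return inter
--
-- def chain_sum(sign, box, rest):
--     (x0, x1), (y0, y1), (z0, z1) = box
--     total = sign * (x1 - x0 + 1) * (y1 - y0 + 1) * (z1 - z0 + 1)
--     for j, (_s, b) in enumerate(rest):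
--         inter = box_intersection(box, b)
--         if inter is not None:
--             total += chain_sum(-sign, inter, rest[j + 1:])
--     return total
-- ===== Notes on version B (the rewrite author's own statement) =====
-- stated objective: alternative
-- what changed: A iteratively rebuilds a growing list of signed interaction regions (each step rewrites the whole list and appends sign-flipped intersections) and sums signed volumes at the end; B keeps no interaction list at all and instead recurses directly over suffixes of the kept steps, summing the signed volume of every chain of successive nonempty intersections on the fly.
import Mathlib
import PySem

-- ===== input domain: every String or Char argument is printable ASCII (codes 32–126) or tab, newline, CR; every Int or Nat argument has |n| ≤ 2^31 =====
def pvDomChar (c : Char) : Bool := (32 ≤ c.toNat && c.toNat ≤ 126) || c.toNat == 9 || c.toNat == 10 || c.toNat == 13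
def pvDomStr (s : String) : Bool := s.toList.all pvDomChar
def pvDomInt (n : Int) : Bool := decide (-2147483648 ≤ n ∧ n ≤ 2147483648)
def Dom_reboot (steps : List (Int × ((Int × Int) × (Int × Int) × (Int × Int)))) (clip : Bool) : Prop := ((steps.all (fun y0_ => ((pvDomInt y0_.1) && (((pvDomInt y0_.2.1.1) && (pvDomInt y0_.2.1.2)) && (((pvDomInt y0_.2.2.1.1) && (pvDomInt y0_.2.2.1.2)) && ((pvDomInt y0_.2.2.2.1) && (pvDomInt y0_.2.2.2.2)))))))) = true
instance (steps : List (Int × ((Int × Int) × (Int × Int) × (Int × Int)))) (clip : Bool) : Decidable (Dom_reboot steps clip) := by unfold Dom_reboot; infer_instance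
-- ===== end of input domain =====

-- B replaces A's iterative rebuilding of a signed-interaction list with a direct recursion over
-- suffixes that sums signed volumes of intersection chains (objective: alternative; return value only).

abbrev PvBox : Type := (Int × Int) × (Int × Int) × (Int × Int)

-- ===== PORT A =====
def pvClipA (x a b : Int) : Int := if x < a then a else if x > b then b else x

def pvClipRng (rng : Int × Int) (a b : Int) : Int × Int := (pvClipA rng.1 a b, pvClipA rng.2 a b)

def pvIsEmpty (rng : Int × Int) : Bool := decide (rng.1 ≥ rng.2)

def pvLinInter (ra rb : Int × Int) : Option (Int × Int) :=
  let x1 := max ra.1 rb.1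
  let x2 := min ra.2 rb.2
  if x1 > x2 then none else some (x1, x2)

def pvInter (a b : PvBox) : Option PvBox :=
  match pvLinInter a.1 b.1 with
  | none => none
  | some ix =>
    match pvLinInter a.2.1 b.2.1 with
    | none => none
    | some iy =>
      match pvLinInter a.2.2 b.2.2 with
      | none => none
      | some iz => some (ix, iy, iz)

def pvComputeInteraction (xa xb : Int × PvBox) : List (Int × PvBox) :=
  match pvInter xa.2 xb.2 with
  | none => [xa]
  | some c => [xa, (-xa.1, c)]

def pvVolume (r : PvBox) : Int :=
  (r.1.2 - r.1.1 + 1) * (r.2.1.2 - r.2.1.1 + 1) * (r.2.2.2 - r.2.2.1 + 1)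

-- the clip-and-skip preamble of A's loop body ('continue' = none)
def pvPrepA (clip : Bool) (sb : Int × PvBox) : Option (Int × PvBox) :=
  if clip then
    let xr := pvClipRng sb.2.1 (-50) 50
    if pvIsEmpty xr then none else
    let yr := pvClipRng sb.2.2.1 (-50) 50
    if pvIsEmpty yr then none else
    let zr := pvClipRng sb.2.2.2 (-50) 50
    if pvIsEmpty zr then none else some (sb.1, (xr, yr, zr))
  else some sb

-- the rest of A's loop body: rebuild the interaction list, append the step if its flag is truthy
def pvUpd (interactions : List (Int × PvBox)) (step_b : Int × PvBox) : List (Int × PvBox) :=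
  let new_interactions := interactions.flatMap (fun x => pvComputeInteraction x step_b)
  if step_b.1 ≠ 0 then new_interactions ++ [step_b] else new_interactions

def reboot (steps : List (Int × ((Int × Int) × (Int × Int) × (Int × Int)))) (clip : Bool) : Int :=
  let interactions := steps.foldl (fun interactions step_b =>
    match pvPrepA clip step_b with
    | none => interactions
    | some step_b => pvUpd interactions step_b) []
  (interactions.map (fun x => x.1 * pvVolume x.2)).sum

-- ===== PORT B =====
def pvClampRng (rng : Int × Int) : Int × Int :=
  (min (max rng.1 (-50)) 50, min (max rng.2 (-50)) 50)

def pvPrepB (clip : Bool) (sb : Int × PvBox) : Option (Int × PvBox) :=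
  if clip then
    let box : PvBox := (pvClampRng sb.2.1, pvClampRng sb.2.2.1, pvClampRng sb.2.2.2)
    if box.1.1 ≥ box.1.2 ∨ box.2.1.1 ≥ box.2.1.2 ∨ box.2.2.1 ≥ box.2.2.2 then none
    else some (sb.1, box)
  else some sb

def pvKept (clip : Bool) : List (Int × PvBox) → List (Int × PvBox)
  | [] => []
  | sb :: t =>
    match pvPrepB clip sb with
    | none => pvKept clip t
    | some k => k :: pvKept clip t

def pvBoxInter (a b : PvBox) : Option PvBox :=
  let ix := (max a.1.1 b.1.1, min a.1.2 b.1.2)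
  let iy := (max a.2.1.1 b.2.1.1, min a.2.1.2 b.2.1.2)
  let iz := (max a.2.2.1 b.2.2.1, min a.2.2.2 b.2.2.2)
  if ix.1 > ix.2 ∨ iy.1 > iy.2 ∨ iz.1 > iz.2 then none else some (ix, iy, iz)

def pvVolB (r : PvBox) : Int :=
  (r.1.2 - r.1.1 + 1) * (r.2.1.2 - r.2.1.1 + 1) * (r.2.2.2 - r.2.2.1 + 1)

-- chain_sum's loop over the remaining suffix (chain_sum sign box rest = sign * volB box + pvChainRest sign box rest)
def pvChainRest (sign : Int) (box : PvBox) : List (Int × PvBox) → Int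
  | [] => 0
  | b :: t =>
    (match pvBoxInter box b.2 with
     | some i => -sign * pvVolB i + pvChainRest (-sign) i t
     | none => 0) + pvChainRest sign box t

def pvChainSum (sign : Int) (box : PvBox) (rest : List (Int × PvBox)) : Int :=
  sign * pvVolB box + pvChainRest sign box rest

def pvSumChains : List (Int × PvBox) → Int
  | [] => 0
  | sb :: t => (if sb.1 ≠ 0 then pvChainSum sb.1 sb.2 t else 0) + pvSumChains t

def reboot_alt (steps : List (Int × ((Int × Int) × (Int × Int) × (Int × Int)))) (clip : Bool) : Int :=
  pvSumChains (pvKept clip steps)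

-- ===== PRECONDITION & SPEC =====
-- a step survives A's clip-and-skip preamble iff its box, clamped to [-50,50], is nonempty on all axes
def pvEffectiveStep (clip : Bool) (b : PvBox) : Bool :=
  !(clip && (decide (min (max b.1.1 (-50)) 50 ≥ min (max b.1.2 (-50)) 50) ||
             decide (min (max b.2.1.1 (-50)) 50 ≥ min (max b.2.1.2 (-50)) 50) ||
             decide (min (max b.2.2.1 (-50)) 50 ≥ min (max b.2.2.2 (-50)) 50)))

-- Pre_ is exactly where Python A returns: A's asserts raise AssertionError unless every surviving
-- step has flag 0 or 1, except that a flag -1 passes when every earlier surviving step had flag 0.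
def Pre_reboot (steps : List (Int × ((Int × Int) × (Int × Int) × (Int × Int)))) (clip : Bool) : Prop :=
  ∀ i, i < steps.length → pvEffectiveStep clip (steps[i]!).2 = true →
    ((steps[i]!).1 = 0 ∨ (steps[i]!).1 = 1 ∨
      ((steps[i]!).1 = -1 ∧
        ∀ j, j < i → pvEffectiveStep clip (steps[j]!).2 = true → (steps[j]!).1 = 0))
instance (steps : List (Int × ((Int × Int) × (Int × Int) × (Int × Int)))) (clip : Bool) : Decidable (Pre_reboot steps clip) := by unfold Pre_reboot; infer_instance

def pvWitness_reboot : (List (Int × ((Int × Int) × (Int × Int) × (Int × Int)))) × Bool :=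
  ([(1, ((0, 1), (0, 1), (0, 1))), (0, ((1, 2), (0, 1), (0, 1)))], true)

def Spec_reboot (steps : List (Int × ((Int × Int) × (Int × Int) × (Int × Int)))) (clip : Bool) (out : Int) : Prop := out = reboot_alt steps clip
instance (steps : List (Int × ((Int × Int) × (Int × Int) × (Int × Int)))) (clip : Bool) (out : Int) : Decidable (Spec_reboot steps clip out) := by unfold Spec_reboot; infer_instance

-- ===== CLAIM (what is proved, stated in full; the proofs are below) =====
def Claim_equal_reboot : Prop := ∀ (steps : List (Int × ((Int × Int) × (Int × Int) × (Int × Int)))) (clip : Bool), Dom_reboot steps clip → Pre_reboot steps clip → Spec_reboot steps clip (reboot steps clip)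

-- ===== LEMMAS AND PROOFS =====
theorem pvClipA_eq (x : Int) : pvClipA x (-50) 50 = min (max x (-50)) 50 := by
  unfold pvClipA; split_ifs <;> omega

theorem pvInter_eq (a b : PvBox) : pvInter a b = pvBoxInter a b := by
  unfold pvInter pvLinInter pvBoxInter
  dsimp only
  split_ifs with h1 h2 h3 h4 h5 h6 <;> simp_all <;> omega

theorem pvPrep_eq (clip : Bool) (sb : Int × PvBox) : pvPrepA clip sb = pvPrepB clip sb := by
  unfold pvPrepA pvPrepB pvClipRng pvClampRng pvIsEmpty
  cases clip
  · simp
  · simp only [if_true, pvClipA_eq, ge_iff_le, decide_eq_true_eq]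
    split_ifs <;> tauto

theorem pvFold_kept (clip : Bool) (L : List (Int × PvBox)) (I : List (Int × PvBox)) :
    L.foldl (fun interactions step_b =>
      match pvPrepA clip step_b with
      | none => interactions
      | some step_b => pvUpd interactions step_b) I
    = (pvKept clip L).foldl pvUpd I := by
  induction L generalizing I with
  | nil => rfl
  | cons b t ih =>
    rw [List.foldl_cons, pvPrep_eq]
    cases h : pvPrepB clip b <;> simp only [pvKept, h, ih, List.foldl_cons]

theorem pvChain_elem (x b : Int × PvBox) (t : List (Int × PvBox)) :
    ((pvComputeInteraction x b).map (fun y => pvChainSum y.1 y.2 t)).sum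
      = pvChainSum x.1 x.2 (b :: t) := by
  unfold pvComputeInteraction
  rw [pvInter_eq]
  cases h : pvBoxInter x.2 b.2 <;>
    simp only [List.map_cons, List.map_nil, List.sum_cons, List.sum_nil, pvChainSum, pvChainRest, h] <;>
    ring

theorem pvChain_flat (b : Int × PvBox) (t : List (Int × PvBox)) (I : List (Int × PvBox)) :
    ((I.flatMap (fun x => pvComputeInteraction x b)).map (fun y => pvChainSum y.1 y.2 t)).sum
      = (I.map (fun x => pvChainSum x.1 x.2 (b :: t))).sum := by
  induction I with
  | nil => rfl
  | cons x xs ih =>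
    simp only [List.flatMap_cons, List.map_append, List.sum_append, List.map_cons, List.sum_cons, ih, pvChain_elem]

theorem pvMain (R : List (Int × PvBox)) (I : List (Int × PvBox)) :
    ((R.foldl pvUpd I).map (fun x => x.1 * pvVolume x.2)).sum
      = (I.map (fun x => pvChainSum x.1 x.2 R)).sum + pvSumChains R := by
  induction R generalizing I with
  | nil => simp [pvChainSum, pvChainRest, pvSumChains, pvVolB, pvVolume]
  | cons b t ih =>
    rw [List.foldl_cons, ih]
    unfold pvUpd
    by_cases hb : b.1 = 0 <;>
      simp only [hb, ne_eq, not_true_eq_false, not_false_eq_true, if_true, if_false,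
        List.map_append, List.sum_append, List.map_cons, List.map_nil,
        List.sum_cons, List.sum_nil, pvChain_flat, pvSumChains] <;>
      ring

-- ===== VERDICT (by name: the statement is the Claim_ definition above) =====
theorem reboot_spec : Claim_equal_reboot := by
  intro steps clip _ _
  unfold Spec_reboot reboot reboot_alt
  rw [pvFold_kept, pvMain]
  simp
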